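-- pv_equiv track=rewrite | github.com/Kenshin9977/shaolin-hangman-solver | main.py | count_prefixes
-- ===== SOURCE A (Python) =====
-- from collections import defaultdict
--
-- def count_prefixes(strings):
--     prefix_count = defaultdict(int)
--     for string in strings:
--         for i in range(1, len(string) + 1):
--             prefix = string[:i]
--             prefix_count[prefix] += 1
--     return dict(
--         sorted(prefix_count.items(), key=lambda item: len(item[0]), reverse=True)
--     )
-- ===== SOURCE B (Python) =====
-- def count_prefixes(strings):
--     # One counting pass; instead of sorting at the end, bucket each distinct
--     # prefix by its length at first sight, then emit the buckets longest-first
--     # (a counting sort by length: the stable-sort order falls out for free).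
--     counts = {}
--     buckets = []  # buckets[j] = distinct prefixes of length j+1, in first-seen order
--     for s in strings:
--         for i in range(1, len(s) + 1):
--             p = s[:i]
--             if p not in counts:
--                 while len(buckets) < i:
--                     buckets.append([])
--                 buckets[i - 1].append(p)
--             counts[p] = counts.get(p, 0) + 1
--     out = {}
--     for bucket in reversed(buckets):
--         for p in bucket:
--             out[p] = counts[p]
--     return out
-- ===== Notes on version B (the rewrite author's own statement) =====
-- stated objective: alternative
-- what changed: Replaces the final comparison sort of the prefix-count dict by length buckets filled at first sight of each distinct prefix and emitted longest-first (a counting sort by length), in the same single counting pass.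
import Mathlib
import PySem

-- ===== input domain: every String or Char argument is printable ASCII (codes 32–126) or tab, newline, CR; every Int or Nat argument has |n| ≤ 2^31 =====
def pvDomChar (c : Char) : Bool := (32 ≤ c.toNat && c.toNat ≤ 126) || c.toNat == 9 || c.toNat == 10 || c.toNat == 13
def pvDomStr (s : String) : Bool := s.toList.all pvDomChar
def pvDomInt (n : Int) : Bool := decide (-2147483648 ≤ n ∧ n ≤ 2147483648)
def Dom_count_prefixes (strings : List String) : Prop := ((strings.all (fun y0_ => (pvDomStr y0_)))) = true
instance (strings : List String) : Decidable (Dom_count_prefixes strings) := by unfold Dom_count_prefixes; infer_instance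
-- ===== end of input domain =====

-- B replaces A's final comparison sort of the prefix-count dict by length buckets filled at
-- first sight of each distinct prefix and emitted longest-first (a counting sort by length).

-- ===== PORT A =====
def count_prefixes (strings : List String) : List (String × Int) :=
  let prefix_count : PySem.Dict String Int :=
    strings.foldl (fun prefix_count string =>
      (PySem.List.pyRange 1 (PySem.Str.len string + 1)).foldl (fun prefix_count i =>
        prefix_count.modify (PySem.Str.slice string none (some i)) 0 (· + 1)) prefix_count)
      PySem.Dict.empty
  (PySem.Dict.ofList (PySem.List.sorted prefix_count.items
      (fun item => PySem.Str.len item.1) true)).items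

-- ===== PORT B =====
-- while len(buckets) < i: buckets.append([])
def pvPad (buckets : List (List String)) (i : Int) : List (List String) :=
  if (buckets.length : Int) < i then pvPad (buckets ++ [[]]) i else buckets
termination_by (i - buckets.length).toNat
decreasing_by simp only [List.length_append, List.length_cons, List.length_nil]; omega

-- buckets[i - 1].append(p); at every call site 1 ≤ i ≤ len(buckets), so the Int index i-1
-- is exactly the Nat (i-1).toNat (Python would raise IndexError only out of that range)
def pvBucketApp (buckets : List (List String)) (i : Int) (p : String) : List (List String) :=
  buckets.set (i - 1).toNat (buckets.getD (i - 1).toNat [] ++ [p])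

def count_prefixes_alt (strings : List String) : List (String × Int) :=
  let st :=
    strings.foldl (fun (st : PySem.Dict String Int × List (List String)) s =>
      (PySem.List.pyRange 1 (PySem.Str.len s + 1)).foldl (fun st i =>
        let p := PySem.Str.slice s none (some i)
        let buckets := if st.1.contains p then st.2
          else pvBucketApp (pvPad st.2 i) i p
        (st.1.insert p (st.1.getD p 0 + 1), buckets)) st)
      (PySem.Dict.empty, [])
  -- out[p] = counts[p]: every bucketed prefix was counted, so the key is present and
  -- getD's default is never taken
  (st.2.reverse.foldl (fun out bucket =>
      bucket.foldl (fun (out : PySem.Dict String Int) p =>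
        out.insert p (st.1.getD p 0)) out)
    PySem.Dict.empty).items

-- ===== PRECONDITION & SPEC =====
def Spec_count_prefixes (strings : List String) (out : List (String × Int)) : Prop := out = count_prefixes_alt strings
instance (strings : List String) (out : List (String × Int)) : Decidable (Spec_count_prefixes strings out) := by unfold Spec_count_prefixes; infer_instance

-- ===== CLAIM (what is proved, stated in full; the proofs are below) =====
def Claim_equal_count_prefixes : Prop := ∀ (strings : List String), Dom_count_prefixes strings → Spec_count_prefixes strings (count_prefixes strings)

-- ===== LEMMAS AND PROOFS =====

-- the prefixes of one string, shortest first, and of the whole input in encounter order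
def prefList (s : String) : List String :=
  (PySem.List.pyRange 1 (PySem.Str.len s + 1)).map (fun i => PySem.Str.slice s none (some i))

def allPref (strings : List String) : List String := (strings.map prefList).flatten

def pvMX (S : List String) : Nat := S.foldl (fun m p => max m p.toList.length) 0

def pvBuckets (S : List String) : List (List String) :=
  (List.range (pvMX S)).map (fun (j : Nat) => S.filter (fun p => PySem.Str.len p == (j : Int) + 1))

theorem len_slice_to (s : String) (i : Int) (h1 : 0 ≤ i) (h2 : i ≤ PySem.Str.len s) :
    PySem.Str.len (PySem.Str.slice s none (some i)) = i := by
  rw [PySem.Str.len_eq] at h2 ⊢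
  simp only [PySem.Str.slice, PySem.Chars.slice, String.toList_ofList]
  rw [PySem.List.slice_to s.toList h1, List.length_take]
  omega

theorem one_le_len_of_mem_prefList (s p : String) (h : p ∈ prefList s) :
    1 ≤ PySem.Str.len p := by
  rcases List.mem_map.1 h with ⟨i, hi, rfl⟩
  rcases PySem.List.mem_pyRange_one.1 hi with ⟨h1, h2⟩
  rw [len_slice_to s i (by omega) (by omega)]
  exact h1

theorem one_le_len_of_mem_allPref (strings : List String) (p : String)
    (h : p ∈ allPref strings) : 1 ≤ PySem.Str.len p := by
  rcases List.mem_flatten.1 h with ⟨l, hl, hp⟩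
  rcases List.mem_map.1 hl with ⟨s, _, rfl⟩
  exact one_le_len_of_mem_prefList s p hp

-- ===== A-side normal form =====
theorem countA (strings : List String) :
    count_prefixes strings =
      (PySem.Dict.ofList (PySem.List.sorted
        ((PySem.Set.ofList (allPref strings)).map
          (fun p => (p, ((allPref strings).count p : Int))))
        (fun item => PySem.Str.len item.1) true)).items := by
  unfold count_prefixes
  have h1 : strings.foldl (fun pc string =>
        (PySem.List.pyRange 1 (PySem.Str.len string + 1)).foldl (fun pc i =>
          pc.modify (PySem.Str.slice string none (some i)) 0 (· + 1)) pc) PySem.Dict.empty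
      = PySem.Dict.counter (allPref strings) := by
    rw [PySem.Dict.counter_eq_foldl, allPref, List.foldl_flatten, List.foldl_map]
    refine PySem.List.foldl_congr_mem strings _ _ _ ?_
    intro acc s _
    rw [prefList, List.foldl_map]
  simp only [h1, PySem.Dict.items_counter]

-- ===== B-side: the loop invariant =====
def stepB (st : PySem.Dict String Int × List (List String)) (p : String) :
    PySem.Dict String Int × List (List String) :=
  (st.1.insert p (st.1.getD p 0 + 1),
   if st.1.contains p then st.2
   else pvBucketApp (pvPad st.2 (PySem.Str.len p)) (PySem.Str.len p) p)

theorem pvPad_eq (b : List (List String)) (i : Int) :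
    pvPad b i = b ++ List.replicate (i - b.length).toNat [] := by
  fun_induction pvPad b i with
  | case1 b h ih =>
    rw [ih, List.append_assoc]
    congr 1
    have : (i - b.length).toNat = (i - (b ++ [[]]).length).toNat + 1 := by
      simp only [List.length_append, List.length_cons, List.length_nil]; omega
    rw [this, List.replicate_succ]
    rfl
  | case2 b h =>
    have : (i - b.length).toNat = 0 := by omega
    simp [this]

theorem pvMX_append (S : List String) (p : String) :
    pvMX (S ++ [p]) = max (pvMX S) p.toList.length := by
  simp [pvMX, List.foldl_append]

theorem len_le_pvMX (S : List String) (q : String) (h : q ∈ S) :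
    q.toList.length ≤ pvMX S :=
  (PySem.List.le_foldl_max_nat S (fun p => p.toList.length) 0).2 q h

theorem buckets_update (S : List String) (p : String) (h1 : 1 ≤ PySem.Str.len p) :
    pvBucketApp (pvPad (pvBuckets S) (PySem.Str.len p)) (PySem.Str.len p) p
      = pvBuckets (S ++ [p]) := by
  have hlen : PySem.Str.len p = (p.toList.length : Int) := PySem.Str.len_eq p
  have hkn1 : 1 ≤ p.toList.length := by omega
  have hblen : (pvBuckets S).length = pvMX S := by
    simp only [pvBuckets, List.length_map, List.length_range]
  have hpad : pvPad (pvBuckets S) (PySem.Str.len p)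
      = pvBuckets S ++ List.replicate (p.toList.length - pvMX S) [] := by
    rw [pvPad_eq, hblen, hlen,
      show ((p.toList.length : Int) - (pvMX S : Int)).toNat = p.toList.length - pvMX S from by omega]
  have hidx : (PySem.Str.len p - 1).toNat = p.toList.length - 1 := by omega
  rw [pvBucketApp, hidx, hpad]
  have hplen : (pvBuckets S ++ List.replicate (p.toList.length - pvMX S) []).length
      = max (pvMX S) p.toList.length := by
    rw [List.length_append, hblen, List.length_replicate]
    omega
  have hpadget : ∀ (j : Nat)
      (hj : j < (pvBuckets S ++ List.replicate (p.toList.length - pvMX S) []).length),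
      (pvBuckets S ++ List.replicate (p.toList.length - pvMX S) [])[j]'hj
        = S.filter (fun q => PySem.Str.len q == (j : Int) + 1) := by
    intro j hj
    by_cases hjM : j < pvMX S
    · rw [List.getElem_append_left (by rw [hblen]; exact hjM)]
      simp only [pvBuckets, List.getElem_map, List.getElem_range]
    · rw [List.getElem_append_right (by rw [hblen]; omega)]
      rw [List.getElem_replicate]
      symm
      rw [List.filter_eq_nil_iff]
      intro q hq hcontra
      have h2 := len_le_pvMX S q hq
      rw [beq_iff_eq, PySem.Str.len_eq] at hcontra
      rw [hplen] at hj
      omega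
  have hgetD : (pvBuckets S ++ List.replicate (p.toList.length - pvMX S) []).getD
        (p.toList.length - 1) []
      = S.filter (fun q => PySem.Str.len q == ((p.toList.length - 1 : Nat) : Int) + 1) := by
    rw [List.getD_eq_getElem _ _ (by rw [hplen]; omega)]
    exact hpadget (p.toList.length - 1) _
  rw [hgetD]
  have hbj : ∀ (T : List String) (j : Nat) (hj : j < (pvBuckets T).length),
      (pvBuckets T)[j]'hj = T.filter (fun q => PySem.Str.len q == (j : Int) + 1) := by
    intro T j hj
    simp only [pvBuckets, List.getElem_map, List.getElem_range]
  apply List.ext_getElem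
  · rw [List.length_set, hplen]
    simp only [pvBuckets, List.length_map, List.length_range, pvMX_append]
  · intro j hjl hjr
    have hj : j < max (pvMX S) p.toList.length := by
      rw [List.length_set, hplen] at hjl
      exact hjl
    rw [List.getElem_set, hbj (S ++ [p]) j hjr, List.filter_append]
    by_cases hcase : p.toList.length - 1 = j
    · rw [if_pos hcase]
      subst hcase
      have hyes : (PySem.Str.len p == ((p.toList.length - 1 : Nat) : Int) + 1) = true := by
        rw [beq_iff_eq, hlen]
        omega
      simp only [List.filter_cons, List.filter_nil, hyes, if_true]
    · rw [if_neg hcase, hpadget j (by rw [hplen]; exact hj)]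
      have hno : (PySem.Str.len p == (j : Int) + 1) = false := by
        rw [beq_eq_false_iff_ne, hlen]
        intro hc
        omega
      simp only [List.filter_cons, List.filter_nil, hno, Bool.false_eq_true, if_false,
        List.append_nil]

theorem invB (L : List String) (h : ∀ p ∈ L, 1 ≤ PySem.Str.len p) :
    L.foldl stepB (PySem.Dict.empty, [])
      = (PySem.Dict.counter L, pvBuckets (PySem.Set.ofList L)) := by
  induction L using List.reverseRecOn with
  | nil => rfl
  | append_singleton L p ih =>
    rw [List.foldl_append, ih (fun q hq => h q (by simp [hq]))]
    have hc : PySem.Dict.counter (L ++ [p])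
        = (PySem.Dict.counter L).insert p ((PySem.Dict.counter L).getD p 0 + 1) := by
      rw [← PySem.Dict.foldl_insert_getD_add_one_eq_counter (L ++ [p]), List.foldl_append,
        PySem.Dict.foldl_insert_getD_add_one_eq_counter]
      rfl
    have hS : PySem.Set.ofList (L ++ [p]) = PySem.Set.add (PySem.Set.ofList L) p := by
      rw [PySem.Set.ofList_eq_foldl, List.foldl_append, ← PySem.Set.ofList_eq_foldl]
      rfl
    simp only [List.foldl_cons, List.foldl_nil, stepB, hc]
    by_cases hp : p ∈ L
    · have hct : (PySem.Dict.counter L).contains p = true := by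
        rw [PySem.Dict.contains_counter]
        simpa using hp
      have hsp : (PySem.Set.ofList L).contains p = true := by
        simp only [PySem.Set.contains]
        simpa using (PySem.Set.mem_ofList L p).2 hp
      rw [hS]
      have hadd : (PySem.Set.ofList L).add p = PySem.Set.ofList L := by
        rw [PySem.Set.add, hsp]
        simp
      rw [hadd]
      simp [hct]
    · have hct : (PySem.Dict.counter L).contains p = false := by
        rw [PySem.Dict.contains_counter]
        simpa using hp
      have hsp : (PySem.Set.ofList L).contains p = false := by
        simp only [PySem.Set.contains]
        simpa using fun hc => hp ((PySem.Set.mem_ofList L p).1 hc)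
      rw [hS]
      have hadd : (PySem.Set.ofList L).add p = PySem.Set.ofList L ++ [p] := by
        rw [PySem.Set.add, hsp]
        simp
      rw [hadd]
      simp only [hct, Bool.false_eq_true, if_false]
      exact congrArg _ (buckets_update _ p (h p (by simp)))

-- ===== B-side normal form =====
theorem countB (strings : List String) :
    count_prefixes_alt strings =
      ((pvBuckets (PySem.Set.ofList (allPref strings))).reverse.flatten.foldl
        (fun out p => out.insert p ((PySem.Dict.counter (allPref strings)).getD p 0))
        PySem.Dict.empty).items := by
  unfold count_prefixes_alt
  have h1 : strings.foldl (fun st s =>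
        (PySem.List.pyRange 1 (PySem.Str.len s + 1)).foldl (fun st i =>
          let p := PySem.Str.slice s none (some i)
          let buckets := if st.1.contains p then st.2
            else pvBucketApp (pvPad st.2 i) i p
          (st.1.insert p (st.1.getD p 0 + 1), buckets)) st)
      (PySem.Dict.empty, ([] : List (List String)))
      = (allPref strings).foldl stepB (PySem.Dict.empty, []) := by
    rw [allPref, List.foldl_flatten, List.foldl_map]
    refine PySem.List.foldl_congr_mem strings _ _ _ ?_
    intro acc s _
    rw [prefList, List.foldl_map]
    refine PySem.List.foldl_congr_mem _ _ _ _ ?_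
    intro st i hi
    rcases PySem.List.mem_pyRange_one.1 hi with ⟨ha, hb⟩
    simp only [stepB, len_slice_to s i (by omega) (by omega)]
  rw [h1, invB (allPref strings) (one_le_len_of_mem_allPref strings)]
  rw [List.foldl_flatten]

-- ===== the stable descending sort is the length-bucket concatenation =====
theorem insertBy_cons {α : Type} (before : α → α → Bool) (x y : α) (ys : List α) :
    PySem.List.insertBy before x (y :: ys)
      = if before x y then x :: y :: ys else y :: PySem.List.insertBy before x ys := by
  simp [PySem.List.insertBy]

theorem insertBy_skip {α : Type} (before : α → α → Bool) (x : α) (g l : List α)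
    (h : ∀ y ∈ g, before x y = false) :
    PySem.List.insertBy before x (g ++ l) = g ++ PySem.List.insertBy before x l := by
  induction g with
  | nil => simp
  | cons y t ih =>
    rw [List.cons_append, insertBy_cons, if_neg (by simp [h y (by simp)]),
      ih (fun z hz => h z (by simp [hz]))]
    rfl

theorem insertBy_front {α : Type} (before : α → α → Bool) (x : α) (l : List α)
    (h : ∀ z ∈ l, before x z = true) :
    PySem.List.insertBy before x l = x :: l := by
  cases l with
  | nil => simp [PySem.List.insertBy]
  | cons z t => rw [insertBy_cons, if_pos (h z (by simp))]

theorem bucketSortAux {α : Type} (key : α → Int) (M : Nat) (x : α) (xs : List α)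
    (hx1 : 1 ≤ key x) (hxM : key x ≤ (M : Int)) :
    PySem.List.insertBy (fun a b => decide (key b < key a)) x
      (((List.range M).reverse.map (fun (j : Nat) => xs.filter (fun y => key y == (j : Int) + 1))).flatten)
    = ((List.range M).reverse.map (fun (j : Nat) => (xs ++ [x]).filter (fun y => key y == (j : Int) + 1))).flatten := by
  induction M with
  | zero => omega
  | succ M ih =>
    have hrange : (List.range (M + 1)).reverse = M :: (List.range M).reverse := by
      rw [List.range_succ, List.reverse_append]
      rfl
    rw [hrange]
    simp only [List.map_cons, List.flatten_cons]
    have hmemflat : ∀ z ∈ ((List.range M).reverse.map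
        (fun (j : Nat) => xs.filter (fun y => key y == (j : Int) + 1))).flatten, key z ≤ (M : Int) := by
      intro z hz
      rcases List.mem_flatten.1 hz with ⟨l, hl, hzl⟩
      rcases List.mem_map.1 hl with ⟨j, hj, rfl⟩
      have hjM : j < M := List.mem_range.1 (List.mem_reverse.1 hj)
      have := (List.mem_filter.1 hzl).2
      rw [beq_iff_eq] at this
      omega
    by_cases hcase : key x = (M : Int) + 1
    · rw [insertBy_skip _ x _ _ (by
        intro y hy
        have := (List.mem_filter.1 hy).2
        rw [beq_iff_eq] at this
        simp only [decide_eq_false_iff_not, not_lt, this, hcase, le_refl])]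
      rw [insertBy_front _ x _ (by
        intro z hz
        have := hmemflat z hz
        simp only [decide_eq_true_eq]
        omega)]
      have hbM : (xs ++ [x]).filter (fun y => key y == (M : Int) + 1)
          = xs.filter (fun y => key y == (M : Int) + 1) ++ [x] := by
        rw [List.filter_append]
        simp [hcase]
      have hrest : (List.range M).reverse.map
            (fun (j : Nat) => (xs ++ [x]).filter (fun y => key y == (j : Int) + 1))
          = (List.range M).reverse.map
            (fun (j : Nat) => xs.filter (fun y => key y == (j : Int) + 1)) := by
        refine List.map_congr_left ?_
        intro j hj
        have hjM : j < M := List.mem_range.1 (List.mem_reverse.1 hj)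
        rw [List.filter_append]
        have : (key x == (j : Int) + 1) = false := by
          rw [beq_eq_false_iff_ne, hcase]
          intro hc
          omega
        simp [this]
      rw [hbM, hrest, List.append_assoc]
      rfl
    · have hxM' : key x ≤ (M : Int) := by push_cast at hxM ⊢; omega
      rw [insertBy_skip _ x _ _ (by
        intro y hy
        have := (List.mem_filter.1 hy).2
        rw [beq_iff_eq] at this
        simp only [decide_eq_false_iff_not, not_lt, this]
        omega)]
      rw [ih hxM']
      have : (xs ++ [x]).filter (fun y => key y == (M : Int) + 1)
          = xs.filter (fun y => key y == (M : Int) + 1) := by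
        rw [List.filter_append]
        have : (key x == (M : Int) + 1) = false := by
          rw [beq_eq_false_iff_ne]
          exact hcase
        simp [this]
      rw [this]

theorem bucketSort {α : Type} (key : α → Int) (M : Nat) (xs : List α)
    (h : ∀ y ∈ xs, 1 ≤ key y ∧ key y ≤ (M : Int)) :
    PySem.List.sorted xs key true
      = ((List.range M).reverse.map (fun (j : Nat) => xs.filter (fun y => key y == (j : Int) + 1))).flatten := by
  induction xs using List.reverseRecOn with
  | nil =>
    rw [PySem.List.sorted_rev_eq_foldl_insertBy]
    simp
  | append_singleton xs x ih =>
    rw [PySem.List.sorted_rev_eq_foldl_insertBy, List.foldl_append,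
      ← PySem.List.sorted_rev_eq_foldl_insertBy]
    simp only [List.foldl_cons, List.foldl_nil]
    rw [ih (fun y hy => h y (by simp [hy]))]
    exact bucketSortAux key M x xs (h x (by simp)).1 (h x (by simp)).2

-- ===== assembly =====
theorem count_eq (strings : List String) :
    count_prefixes strings = count_prefixes_alt strings := by
  rw [countA, countB]
  set L := allPref strings with hLdef
  set S := PySem.Set.ofList L with hSdef
  have hSnodup : S.Nodup := PySem.Set.nodup_ofList L
  have hSlen : ∀ q ∈ S, 1 ≤ PySem.Str.len q ∧ PySem.Str.len q ≤ ((pvMX S : Nat) : Int) := by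
    intro q hq
    refine ⟨one_le_len_of_mem_allPref strings q ((PySem.Set.mem_ofList L q).1 hq), ?_⟩
    have := len_le_pvMX S q hq
    rw [PySem.Str.len_eq]
    omega
  set f : String → String × Int := fun p => (p, (L.count p : Int)) with hfdef
  -- A side: the sorted list of items is the mapped bucket concatenation
  have hsorted : PySem.List.sorted (S.map f) (fun item => PySem.Str.len item.1) true
      = ((pvBuckets S).reverse.flatten).map f := by
    rw [bucketSort (fun item => PySem.Str.len item.1) (pvMX S) (S.map f) (by
      intro y hy
      rcases List.mem_map.1 hy with ⟨q, hq, rfl⟩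
      exact hSlen q hq)]
    have hfil : ∀ (j : Nat), (S.map f).filter (fun y => PySem.Str.len y.1 == (j : Int) + 1)
        = (S.filter (fun q => PySem.Str.len q == (j : Int) + 1)).map f := by
      intro j
      rw [List.filter_map]
      rfl
    simp only [hfil]
    simp only [List.map_reverse, List.map_flatten, pvBuckets, List.map_map, Function.comp_def]
  -- the flattened reversed buckets have no duplicate entries
  have hRnodup : ((pvBuckets S).reverse.flatten).Nodup := by
    rw [List.nodup_flatten]
    constructor
    · intro l hl
      rcases List.mem_map.1 (List.mem_reverse.1 hl) with ⟨j, _, rfl⟩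
      exact hSnodup.filter _
    · rw [List.pairwise_reverse, pvBuckets, List.pairwise_map]
      refine List.Pairwise.imp ?_ (List.pairwise_lt_range)
      intro a b hab q hq hq'
      have h1 := (List.mem_filter.1 hq).2
      have h2 := (List.mem_filter.1 hq').2
      rw [beq_iff_eq] at h1 h2
      omega
  -- A side: re-inserting the distinct-key sorted pairs into a dict keeps them as they are
  have hA : (PySem.Dict.ofList (PySem.List.sorted (S.map f)
        (fun item => PySem.Str.len item.1) true)).items
      = PySem.List.sorted (S.map f) (fun item => PySem.Str.len item.1) true := by
    have hperm : (PySem.List.sorted (S.map f) (fun item => PySem.Str.len item.1) true).Perm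
        (S.map f) := PySem.List.sorted_perm _ _ _
    have hnodup : ((PySem.List.sorted (S.map f) (fun item => PySem.Str.len item.1) true).map
        Prod.fst).Nodup := by
      refine ((hperm.map Prod.fst).nodup_iff).2 ?_
      rw [List.map_map]
      have hid : (Prod.fst ∘ f) = fun p => p := by
        funext p
        simp [hfdef]
      rw [hid, List.map_id']
      exact hSnodup
    show ((PySem.List.sorted (S.map f) (fun item => PySem.Str.len item.1) true).foldl
        (fun acc p => acc.insert p.1 p.2) PySem.Dict.empty).items = _
    rw [PySem.Dict.items_foldl_insert_fresh _ Prod.fst Prod.snd PySem.Dict.empty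
      (fun a _ => PySem.Dict.contains_empty a.1) hnodup]
    simp [show (PySem.Dict.empty : PySem.Dict String Int).items = [] from rfl]
  -- B side: inserting the fresh bucketed keys lists them in order
  have hB : (((pvBuckets S).reverse.flatten).foldl
        (fun out p => out.insert p ((PySem.Dict.counter L).getD p 0))
        PySem.Dict.empty).items
      = ((pvBuckets S).reverse.flatten).map f := by
    rw [PySem.Dict.items_foldl_insert_fresh _ (fun p => p)
      (fun p => (PySem.Dict.counter L).getD p 0) PySem.Dict.empty
      (fun a _ => PySem.Dict.contains_empty a) (by simpa using hRnodup)]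
    simp [hfdef, PySem.Dict.getD_counter,
      show (PySem.Dict.empty : PySem.Dict String Int).items = [] from rfl]
  rw [hA, hsorted, hB]

-- ===== VERDICT (by name: the statement is the Claim_ definition above) =====
theorem count_prefixes_spec : Claim_equal_count_prefixes := by
  intro strings _
  exact count_eq strings
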